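-- pv_equiv track=rewrite | github.com/symbol-management/symbol-exporter | symbol_exporter/line_inspection.py | infer_filenames
-- ===== SOURCE A (Python) =====
-- def infer_filenames(module_symbols):
--     out = {}
--     for i, symbol in enumerate(module_symbols):
--         z = module_symbols.pop(i)
--         if any(m.startswith(z) for m in module_symbols):
--             out[z] = z.replace(".", "/") + "__init__.py"
--         else:
--             out[z] = z.replace(".", "/") + ".py"
--         module_symbols.insert(i, z)
--     return out
-- ===== SOURCE B (Python) =====
-- def infer_filenames(module_symbols):
--     # Sort once; another symbol starting with z exists iff the element right
--     # after the first occurrence of z in the sorted list starts with z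
--     # (all extensions/duplicates of z are contiguous there).
--     s = sorted(module_symbols)
--     n = len(s)
--     flag = {}
--     for k, z in enumerate(s):
--         if z not in flag:
--             flag[z] = k + 1 < n and s[k + 1].startswith(z)
--     out = {}
--     for z in module_symbols:
--         out[z] = z.replace(".", "/") + ("__init__.py" if flag[z] else ".py")
--     return out
-- ===== Notes on version B (the rewrite author's own statement) =====
-- stated objective: faster
-- what changed: Replaces the per-symbol pop/any-scan/reinsert over the whole list (O(n^2*L)) by one sort and, per distinct symbol, a single check of the element following its first occurrence in the sorted list (extensions and duplicates of a prefix are contiguous after sorting), memoized in a dict.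
import Mathlib
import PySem

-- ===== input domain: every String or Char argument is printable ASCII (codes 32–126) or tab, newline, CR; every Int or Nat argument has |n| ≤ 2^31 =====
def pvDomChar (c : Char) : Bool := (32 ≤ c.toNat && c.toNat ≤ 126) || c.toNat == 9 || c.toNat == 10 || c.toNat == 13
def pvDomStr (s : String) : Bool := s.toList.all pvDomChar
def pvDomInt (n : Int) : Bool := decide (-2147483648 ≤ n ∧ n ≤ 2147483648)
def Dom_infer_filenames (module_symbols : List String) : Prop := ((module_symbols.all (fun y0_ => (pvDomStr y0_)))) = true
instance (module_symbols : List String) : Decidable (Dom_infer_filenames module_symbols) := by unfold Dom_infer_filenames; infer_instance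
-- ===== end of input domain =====

-- B replaces A's per-symbol pop/any-scan/reinsert over the whole list by one sort plus a
-- successor check at each first occurrence (objective: faster).
-- A mutates module_symbols only temporarily (pop then insert restores it); net effect is none.

-- ===== PORT A =====
def infer_filenames (module_symbols : List String) : List (String × String) :=
  ((PySem.List.pyRange 0 (PySem.List.len module_symbols)).foldl
    (fun (st : List String × PySem.Dict String String) i =>
      match PySem.List.pop? st.1 i with
      | none => st            -- unreachable: each index of the range is in bounds
      | some (z, rest) =>
        let out' :=
          if rest.any (fun m => PySem.Str.startswith m z)
          then st.2.insert z (PySem.Str.replace z "." "/" ++ "__init__.py")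
          else st.2.insert z (PySem.Str.replace z "." "/" ++ ".py")
        (PySem.List.insert rest i z, out'))
    (module_symbols, PySem.Dict.empty)).2.items

-- ===== PORT B =====
def infer_filenames_alt (module_symbols : List String) : List (String × String) :=
  let s := PySem.List.sorted module_symbols (fun x => x) false
  let n := PySem.List.len s
  let flag := (PySem.List.enumerate s 0).foldl
    (fun (d : PySem.Dict String Bool) kz =>
      if d.contains kz.2 then d
      else d.insert kz.2 (decide (kz.1 + 1 < n) &&
        PySem.Str.startswith (PySem.List.pyGetD s (kz.1 + 1) "") kz.2))
    PySem.Dict.empty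
  -- flag[z]: every z of module_symbols occurs in s (a permutation), so Python's flag[z]
  -- never raises; getD with an arbitrary default is exact here.  The `&&` mirrors
  -- Python's short-circuit `and`: the pyGetD default is never read when k+1 = n.
  (module_symbols.foldl
    (fun (d : PySem.Dict String String) z =>
      d.insert z (PySem.Str.replace z "." "/" ++
        (if flag.getD z false then "__init__.py" else ".py")))
    PySem.Dict.empty).items

-- ===== PRECONDITION & SPEC =====
def Spec_infer_filenames (module_symbols : List String) (out : List (String × String)) : Prop := out = infer_filenames_alt module_symbols
instance (module_symbols : List String) (out : List (String × String)) : Decidable (Spec_infer_filenames module_symbols out) := by unfold Spec_infer_filenames; infer_instance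

-- ===== CLAIM (what is proved, stated in full; the proofs are below) =====
def Claim_equal_infer_filenames : Prop := ∀ (module_symbols : List String), Dom_infer_filenames module_symbols → Spec_infer_filenames module_symbols (infer_filenames module_symbols)

-- ===== LEMMAS AND PROOFS =====

-- "m starts with z" — the condition both programs test, as a predicate of m.
def pvP (z m : String) : Bool := PySem.Str.startswith m z

-- the filename A records for z, rephrased through the count of symbols extending z
def pvFA (xs : List String) (z : String) : String :=
  if 2 ≤ xs.countP (pvP z)
  then PySem.Str.replace z "." "/" ++ "__init__.py"
  else PySem.Str.replace z "." "/" ++ ".py"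

-- A's step function (the literal lambda of port A).
def pvStepA : (List String × PySem.Dict String String) → Int → (List String × PySem.Dict String String) :=
  fun st i =>
    match PySem.List.pop? st.1 i with
    | none => st
    | some (z, rest) =>
      let out' :=
        if rest.any (fun m => PySem.Str.startswith m z)
        then st.2.insert z (PySem.Str.replace z "." "/" ++ "__init__.py")
        else st.2.insert z (PySem.Str.replace z "." "/" ++ ".py")
      (PySem.List.insert rest i z, out')

-- B's flag value and flag-loop step function (the literal lambda of port B).
def pvValB (s : List String) (n k : Int) (z : String) : Bool :=
  decide (k + 1 < n) && PySem.Str.startswith (PySem.List.pyGetD s (k + 1) "") z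

def pvStepB (s : List String) (n : Int) : PySem.Dict String Bool → (Int × String) → PySem.Dict String Bool :=
  fun d kz => if d.contains kz.2 then d else d.insert kz.2 (pvValB s n kz.1 kz.2)

theorem pv_sw_iff (m z : String) : pvP z m = true ↔ z.toList <+: m.toList := by
  rw [pvP, PySem.Str.startswith_eq, PySem.Chars.startswith_iff]

theorem pv_startswith_self (z : String) : PySem.Str.startswith z z = true := by
  rw [PySem.Str.startswith_eq]; exact (PySem.Chars.startswith_iff _ _).mpr (List.prefix_refl _)

-- ---- A-side: the pop/any/insert step only reads the element, and the count of
-- ---- prefix-extensions in the list minus one occurrence is the full count minus 1.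

theorem pv_any_eraseIdx (l : List String) (k : Nat) (hk : k < l.length) (p : String → Bool)
    (hp : p l[k] = true) : (l.eraseIdx k).any p = decide (2 ≤ l.countP p) := by
  have hsplit : l.countP p = (l.take k).countP p + ((l.drop (k+1)).countP p + 1) := by
    conv_lhs => rw [← List.take_append_drop k l, ← List.getElem_cons_drop hk]
    rw [List.countP_append, List.countP_cons, hp]
    simp
  have hcnt : l.countP p = (l.eraseIdx k).countP p + 1 := by
    rw [List.eraseIdx_eq_take_drop_succ, List.countP_append]; omega
  have hany : (l.eraseIdx k).any p = decide (0 < (l.eraseIdx k).countP p) := by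
    rcases h : (l.eraseIdx k).any p with _ | _
    · simp only [List.any_eq_false] at h
      simp [List.countP_eq_zero.mpr (by intro a ha; exact (h a ha))]
    · rw [List.any_eq_true] at h
      obtain ⟨x, hx, hpx⟩ := h
      simp [List.countP_pos_iff.mpr ⟨x, hx, hpx⟩]
  rw [hany]
  exact decide_eq_decide.mpr (by omega)

theorem pv_insert_eraseIdx (xs : List String) (k : Nat) (hk : k < xs.length) :
    PySem.List.insert (xs.eraseIdx k) (k : Int) xs[k] = xs := by
  have hlen : (xs.eraseIdx k).length = xs.length - 1 := by simp [List.length_eraseIdx, hk]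
  rw [PySem.List.insert_natCast _ _ _ (by omega)]
  rw [List.eraseIdx_eq_take_drop_succ]
  rw [List.take_append_of_le_length (by simp; omega)]
  rw [List.take_take, min_self]
  rw [List.drop_left' (by simp [List.length_take]; omega)]
  rw [List.getElem_cons_drop hk, List.take_append_drop]

theorem pv_stepA (xs : List String) (d : PySem.Dict String String) (i : Int)
    (h0 : 0 ≤ i) (hi : i < xs.length) :
    pvStepA (xs, d) i =
      (xs, d.insert (PySem.List.pyGetD xs i "") (pvFA xs (PySem.List.pyGetD xs i ""))) := by
  obtain ⟨k, rfl⟩ : ∃ k : Nat, i = (k : Int) := ⟨i.toNat, (Int.toNat_of_nonneg h0).symm⟩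
  have hk : k < xs.length := by exact_mod_cast hi
  unfold pvStepA
  rw [PySem.List.pop?_natCast xs k hk]
  simp only []
  rw [pv_insert_eraseIdx xs k hk]
  rw [pv_any_eraseIdx xs k hk (fun m => PySem.Str.startswith m xs[k]) (pv_startswith_self _)]
  have hget : PySem.List.pyGetD xs (k : Int) "" = xs[k] := by
    simp [PySem.List.pyGetD_natCast, hk]
  rw [hget]
  unfold pvFA pvP
  simp only [decide_eq_true_eq]
  exact congrArg (Prod.mk xs) (apply_ite (d.insert xs[k]) _ _ _).symm

theorem pv_foldA (idxs : List Int) (xs : List String) (d : PySem.Dict String String)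
    (h : ∀ i ∈ idxs, 0 ≤ i ∧ i < xs.length) :
    idxs.foldl pvStepA (xs, d) =
      (xs, idxs.foldl
        (fun d i => d.insert (PySem.List.pyGetD xs i "") (pvFA xs (PySem.List.pyGetD xs i ""))) d) := by
  induction idxs generalizing d with
  | nil => rfl
  | cons i idxs ih =>
    simp only [List.foldl_cons]
    rw [pv_stepA xs d i (h i (List.mem_cons_self)).1 (h i (List.mem_cons_self)).2]
    exact ih _ (fun j hj => h j (List.mem_cons_of_mem _ hj))

theorem pv_A_eq (xs : List String) :
    infer_filenames xs =
      (xs.foldl (fun d z => d.insert z (pvFA xs z)) PySem.Dict.empty).items := by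
  show ((PySem.List.pyRange 0 (PySem.List.len xs)).foldl pvStepA (xs, PySem.Dict.empty)).2.items = _
  rw [pv_foldA _ xs _ (by
    intro i hi
    have := PySem.List.mem_pyRange_one.mp hi
    simpa using this)]
  exact congrArg PySem.Dict.items
    (PySem.List.foldl_pyRange_zero_pyGetD xs "" (fun d z => d.insert z (pvFA xs z)) PySem.Dict.empty)

-- ---- B-side: what the flag dict holds for each key.

theorem pv_get?_eq_none (d : PySem.Dict String Bool) (z : String) (h : ¬ d.contains z = true) :
    d.get? z = none := by
  rw [PySem.Dict.contains_eq_isSome_get?] at h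
  exact Option.not_isSome_iff_eq_none.mp h

theorem pv_stepB_ne (s : List String) (n : Int) (d : PySem.Dict String Bool) (k : Int)
    (x z : String) (hxz : x ≠ z) :
    (pvStepB s n d (k, x)).get? z = d.get? z ∧
      (pvStepB s n d (k, x)).contains z = d.contains z := by
  unfold pvStepB
  dsimp only
  split
  · exact ⟨rfl, rfl⟩
  · refine ⟨PySem.Dict.get?_insert_of_ne d _ (Ne.symm hxz), ?_⟩
    rw [PySem.Dict.contains_insert]
    simp [Ne.symm hxz]

theorem pv_flag_get? (s : List String) (n : Int) (l : List String) (k0 : Int)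
    (d : PySem.Dict String Bool) (z : String) :
    ((PySem.List.enumerate l k0).foldl (pvStepB s n) d).get? z =
      if d.contains z then d.get? z
      else (PySem.List.index? l z).map (fun j : Nat => pvValB s n (k0 + (j : Int)) z) := by
  induction l generalizing k0 d with
  | nil =>
    simp only [PySem.List.enumerate_nil, List.foldl_nil, PySem.List.index?]
    by_cases hc : d.contains z = true
    · rw [if_pos hc]
    · rw [if_neg hc, pv_get?_eq_none d z hc]
      rfl
  | cons x t ih =>
    rw [PySem.List.enumerate_cons, List.foldl_cons]
    by_cases hxz : x = z
    · subst hxz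
      by_cases hc : d.contains x = true
      · have hstep : pvStepB s n d (k0, x) = d := by unfold pvStepB; simp [hc]
        rw [hstep, ih, if_pos hc, if_pos hc]
      · have hstep : pvStepB s n d (k0, x) = d.insert x (pvValB s n k0 x) := by
          unfold pvStepB; simp [hc]
        rw [hstep, ih]
        rw [if_pos (by rw [PySem.Dict.contains_insert]; simp)]
        rw [PySem.Dict.get?_insert_self, if_neg hc, PySem.List.index?_cons_self]
        simp
    · obtain ⟨hget, hcont⟩ := pv_stepB_ne s n d k0 x z hxz
      rw [ih, hcont, hget, PySem.List.index?_cons_of_ne t hxz]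
      by_cases hc : d.contains z = true
      · rw [if_pos hc, if_pos hc]
      · rw [if_neg hc, if_neg hc, Option.map_map]
        cases PySem.List.index? t z with
        | none => rfl
        | some j =>
          simp only [Option.map_some, Function.comp_apply]
          congr 1
          push_cast
          ring_nf

-- ---- order facts: a prefix is ≤ its extension, and anything between a string and
-- ---- one of its extensions (in code-point order) also extends it.

theorem pv_prefix_not_lt (a : List Char) : ∀ (b : List Char), a <+: b → ¬ b < a := by
  induction a with
  | nil => intro b _ hb; exact List.not_lt_nil _ hb
  | cons c a' ih =>
    intro b hpre
    obtain ⟨t, rfl⟩ := hpre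
    rw [List.cons_append]
    intro hlt
    rcases List.cons_lt_cons_iff.mp hlt with h | ⟨-, h⟩
    · exact lt_irrefl c h
    · exact ih _ ⟨t, rfl⟩ h

theorem pv_between (z : List Char) : ∀ (v w : List Char), ¬ v < z → ¬ w < v → z <+: w → z <+: v := by
  induction z with
  | nil => intro v w _ _ _; exact List.nil_prefix
  | cons a z' ih =>
    intro v w h1 h2 h3
    obtain ⟨t, rfl⟩ := h3
    cases v with
    | nil => exact absurd (List.nil_lt_cons _ _) h1
    | cons b v' =>
      have hba : ¬ b < a := fun h => h1 (List.cons_lt_cons_iff.mpr (Or.inl h))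
      have hab : ¬ a < b := fun h => h2 (by rw [List.cons_append]; exact List.cons_lt_cons_iff.mpr (Or.inl h))
      have heq : a = b := le_antisymm (not_lt.mp hba) (not_lt.mp hab)
      subst heq
      have h1' : ¬ v' < z' := fun h => h1 (List.cons_lt_cons_iff.mpr (Or.inr ⟨rfl, h⟩))
      have h2' : ¬ (z' ++ t) < v' := fun h => h2 (by rw [List.cons_append]; exact List.cons_lt_cons_iff.mpr (Or.inr ⟨rfl, h⟩))
      exact List.cons_prefix_cons.mpr ⟨rfl, ih v' (z' ++ t) h1' h2' ⟨t, rfl⟩⟩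

-- at the first occurrence of z in the sorted list, the successor check equals "2 ≤ count"
theorem pv_valB_eq (xs : List String) (z : String) (k : Nat)
    (hidx : PySem.List.index? (PySem.List.sorted xs (fun x => x) false) z = some k) :
    pvValB (PySem.List.sorted xs (fun x => x) false)
        (PySem.List.len (PySem.List.sorted xs (fun x => x) false)) k z =
      decide (2 ≤ xs.countP (pvP z)) := by
  set s := PySem.List.sorted xs (fun x => x) false with hs
  obtain ⟨hk, hkz, hmin⟩ := PySem.List.getElem_of_index?_eq_some hidx
  have hmono : ∀ (p q : Nat) (hpq : p ≤ q) (hq : q < s.length), s[p] ≤ s[q] := by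
    intro p q hpq hq
    exact PySem.List.sorted_id_getElem_mono xs hpq hq
  have hperm : s.countP (pvP z) = xs.countP (pvP z) := (PySem.List.sorted_perm xs _ false).countP_eq _
  -- the first k+1 entries contain exactly one element that starts with z (namely s[k] = z)
  have htake : (s.take (k+1)).countP (pvP z) = 1 := by
    have htk : s.take (k+1) = s.take k ++ [s[k]] := by
      rw [List.take_add_one, List.getElem?_eq_getElem hk]
      rfl
    have hz0 : (s.take k).countP (pvP z) = 0 := by
      rw [List.countP_eq_zero]
      intro a ha
      obtain ⟨j, hj, rfl⟩ := List.mem_take_iff_getElem.mp ha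
      have hjk : j < k := lt_of_lt_of_le hj (min_le_left _ _)
      intro hpa
      have h1 : ¬ s[j].toList < z.toList := pv_prefix_not_lt _ _ ((pv_sw_iff _ _).mp hpa)
      have h2 : s[j].toList ≤ z.toList :=
        String.le_iff_toList_le.mp (hkz ▸ hmono j k (le_of_lt hjk) hk)
      exact hmin j hjk (String.toList_inj.mp (le_antisymm h2 (not_lt.mp h1)))
    rw [htk, List.countP_append, hz0, List.countP_cons]
    simp [hkz, (pv_sw_iff z z).mpr (List.prefix_refl _)]
  have hsplit : s.countP (pvP z) = (s.take (k+1)).countP (pvP z) + (s.drop (k+1)).countP (pvP z) := by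
    conv_lhs => rw [← List.take_append_drop (k+1) s]
    rw [List.countP_append]
  unfold pvValB
  by_cases hlt : k + 1 < s.length
  · have hn : ((k : Int) + 1 < PySem.List.len s) := by rw [PySem.List.len_eq]; exact_mod_cast hlt
    have hget : PySem.List.pyGetD s ((k : Int) + 1) "" = s[k+1] := by
      have : ((k : Int) + 1) = ((k + 1 : Nat) : Int) := by push_cast; ring
      rw [this, PySem.List.pyGetD_natCast, List.getD_eq_getElem _ _ hlt]
    rw [hget, decide_eq_true hn, Bool.true_and]
    rcases hsw : PySem.Str.startswith s[k+1] z with _ | _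
    · symm
      rw [decide_eq_false_iff_not]
      intro h2
      rw [← hperm, hsplit, htake] at h2
      have hdrop : 0 < (s.drop (k+1)).countP (pvP z) := by omega
      obtain ⟨m, hm, hpm⟩ := List.countP_pos_iff.mp hdrop
      obtain ⟨j, hj, rfl⟩ := List.mem_drop_iff_getElem.mp hm
      have h1 : ¬ s[k+1].toList < z.toList :=
        not_lt.mpr (String.le_iff_toList_le.mp (hkz ▸ hmono k (k+1) (by omega) hlt))
      have h2' : ¬ s[k+1+j].toList < s[k+1].toList :=
        not_lt.mpr (String.le_iff_toList_le.mp (hmono (k+1) (k+1+j) (by omega) (by omega)))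
      have h3 : z.toList <+: s[k+1+j].toList := (pv_sw_iff _ _).mp hpm
      have : z.toList <+: s[k+1].toList := pv_between _ _ _ h1 h2' h3
      have : pvP z s[k+1] = true := (pv_sw_iff _ _).mpr this
      rw [pvP] at this
      rw [this] at hsw
      exact absurd hsw (by simp)
    · symm
      rw [decide_eq_true_eq, ← hperm, hsplit, htake]
      have hdrop : 0 < (s.drop (k+1)).countP (pvP z) := by
        apply List.countP_pos_iff.mpr
        refine ⟨s[k+1], ?_, ?_⟩
        · rw [← List.getElem_cons_drop hlt]
          exact List.mem_cons_self
        · rw [pvP]; exact hsw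
      omega
  · have hn : ¬ ((k : Int) + 1 < PySem.List.len s) := by rw [PySem.List.len_eq]; exact_mod_cast hlt
    rw [decide_eq_false hn, Bool.false_and]
    symm
    rw [decide_eq_false_iff_not]
    intro h2
    rw [← hperm, hsplit, htake] at h2
    have : s.drop (k+1) = [] := List.drop_eq_nil_of_le (by omega)
    rw [this] at h2
    simp at h2

-- the flag dict agrees with A's count condition on every symbol of the input
theorem pv_flag_getD (xs : List String) (z : String) (hz : z ∈ xs) :
    ((PySem.List.enumerate (PySem.List.sorted xs (fun x => x) false) 0).foldl
        (pvStepB (PySem.List.sorted xs (fun x => x) false)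
          (PySem.List.len (PySem.List.sorted xs (fun x => x) false))) PySem.Dict.empty).getD z false =
      decide (2 ≤ xs.countP (pvP z)) := by
  set s := PySem.List.sorted xs (fun x => x) false with hs
  have hzs : z ∈ s := (PySem.List.mem_sorted xs _ false z).mpr hz
  obtain ⟨k, hk⟩ := Option.isSome_iff_exists.mp ((PySem.List.index?_isSome_iff s z).mpr hzs)
  have hget := pv_flag_get? s (PySem.List.len s) s 0 PySem.Dict.empty z
  rw [if_neg (by rw [PySem.Dict.contains_empty]; simp), hk] at hget
  show (_ : PySem.Dict String Bool).getD z false = _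
  rw [PySem.Dict.getD, hget]
  simp only [Option.map_some, Option.getD_some, zero_add]
  exact pv_valB_eq xs z k hk

theorem pv_B_eq (xs : List String) :
    infer_filenames_alt xs =
      (xs.foldl (fun d z => d.insert z
        (PySem.Str.replace z "." "/" ++
          (if ((PySem.List.enumerate (PySem.List.sorted xs (fun x => x) false) 0).foldl
                (pvStepB (PySem.List.sorted xs (fun x => x) false)
                  (PySem.List.len (PySem.List.sorted xs (fun x => x) false))) PySem.Dict.empty).getD z false
           then "__init__.py" else ".py"))) PySem.Dict.empty).items := rfl

-- ===== VERDICT (by name: the statement is the Claim_ definition above) =====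
theorem infer_filenames_spec : Claim_equal_infer_filenames := by
  intro xs _
  unfold Spec_infer_filenames
  rw [pv_A_eq, pv_B_eq]
  refine congrArg PySem.Dict.items (PySem.List.foldl_congr_mem xs _ _ _ ?_)
  intro d z hz
  rw [pv_flag_getD xs z hz]
  unfold pvFA
  by_cases h : 2 ≤ xs.countP (pvP z)
  · simp [h]
  · simp [h]
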